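-- pv_equiv track=rewrite | github.com/lcorbel/BridgeThesis | shadow_best_player_movieV2.py | _compute_declarer
-- ===== SOURCE A (Python) =====
-- from typing import Dict, Iterable, Iterator, List, Optional, Tuple
--
-- SEATS = ('N','E','S','W')
--
-- def _is_contract_bid(tok: str) -> bool:
--     t = tok.upper()
--     return len(t) >= 2 and t[0] in "1234567" and t[1] in "CDHSN"
--
-- def _dealer_index(seat: str) -> int:
--     try:
--         return SEATS.index(seat.upper())
--     except Exception:
--         return 0
--
-- def _compute_declarer(dealer: str, bids: List[str]) -> str:
--     d_idx = _dealer_index(dealer)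
--     final_idx: Optional[int] = None
--     final_strain: Optional[str] = None
--     for i, tok in enumerate(bids):
--         if _is_contract_bid(tok):
--             final_idx = i
--             final_strain = tok[1].upper()
--     if final_idx is None or not final_strain:
--         return dealer.upper()
--     final_seat_idx = (d_idx + final_idx) % 4
--     final_side_parity = final_seat_idx % 2
--     for i, tok in enumerate(bids):
--         if _is_contract_bid(tok) and tok[1].upper() == final_strain:
--             seat_idx = (d_idx + i) % 4
--             if seat_idx % 2 == final_side_parity:
--                 return SEATS[seat_idx]
--     return SEATS[final_seat_idx]
-- ===== SOURCE B (Python) =====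
-- from typing import Dict, List, Optional, Tuple
--
-- SEATS = ('N','E','S','W')
--
-- def _is_contract_bid(tok: str) -> bool:
--     t = tok.upper()
--     return len(t) >= 2 and t[0] in "1234567" and t[1] in "CDHSN"
--
-- def _dealer_index(seat: str) -> int:
--     try:
--         return SEATS.index(seat.upper())
--     except Exception:
--         return 0
--
-- def _compute_declarer(dealer: str, bids: List[str]) -> str:
--     # One pass: remember the FIRST bid index per (seat-parity, strain) and the LAST contract bid.
--     first: Dict[Tuple[int, str], int] = {}
--     last: Optional[Tuple[int, str]] = None
--     for i, tok in enumerate(bids):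
--         if _is_contract_bid(tok):
--             strain = tok[1].upper()
--             key = (i % 2, strain)
--             if key not in first:
--                 first[key] = i
--             last = (i, strain)
--     if last is None:
--         return dealer.upper()
--     d = _dealer_index(dealer)
--     j = first[(last[0] % 2, last[1])]
--     return SEATS[(d + j) % 4]
-- ===== Notes on version B (the rewrite author's own statement) =====
-- stated objective: alternative
-- what changed: A's second scan over the bids (searching for the first same-side bid of the final strain) is replaced by a dict of first (seat-parity, strain) occurrences built during the single pass that also finds the last contract bid, so the answer becomes one dict lookup after one pass.
import Mathlib
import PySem

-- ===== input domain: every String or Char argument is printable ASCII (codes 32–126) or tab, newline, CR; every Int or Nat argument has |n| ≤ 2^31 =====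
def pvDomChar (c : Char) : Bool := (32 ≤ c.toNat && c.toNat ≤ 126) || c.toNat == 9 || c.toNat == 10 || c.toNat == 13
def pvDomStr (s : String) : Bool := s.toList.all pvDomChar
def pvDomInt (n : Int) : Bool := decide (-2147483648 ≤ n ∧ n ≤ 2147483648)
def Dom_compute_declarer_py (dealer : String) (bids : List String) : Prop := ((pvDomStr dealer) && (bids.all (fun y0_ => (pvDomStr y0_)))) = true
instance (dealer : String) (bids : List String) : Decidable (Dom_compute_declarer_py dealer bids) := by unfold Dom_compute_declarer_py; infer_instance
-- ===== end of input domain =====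

-- B replaces A's second scan over the bids by a dict of first (parity, strain) occurrences
-- built in the single pass that also finds the last contract bid (objective: alternative, one pass).
-- Helpers shared by both ports (both Pythons share _is_contract_bid / _dealer_index / SEATS).

def pvSeats : List String := ["N", "E", "S", "W"]

-- t = tok.upper(); len(t) >= 2 and t[0] in "1234567" and t[1] in "CDHSN"
def pvIsContract (tok : String) : Bool :=
  let t := PySem.Chars.upper tok.toList
  decide (2 ≤ t.length) && "1234567".toList.contains (t.getD 0 ' ')
    && "CDHSN".toList.contains (t.getD 1 ' ')

-- tok[1].upper() (evaluated only under pvIsContract, so index 1 exists)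
def pvStrain (tok : String) : Char :=
  PySem.Chars.upperChar (tok.toList.getD 1 ' ')

-- SEATS.index(seat.upper()) with try/except -> 0
def pvDealerIndex (seat : String) : Nat :=
  (PySem.List.index? pvSeats (PySem.Str.upper seat)).getD 0

-- ===== PORT A =====
-- A's first loop: final_idx / final_strain, updated together
def pvAStep (st : Option Nat × Option Char) (p : String × Nat) : Option Nat × Option Char :=
  if pvIsContract p.1 then (some p.2, some (pvStrain p.1)) else st

-- A's second loop: first contract bid of the final strain on the declaring side (returns inside the loop)
def pvFindDecl (d : Nat) (fs : Char) (par : Nat) : List (String × Nat) → Option String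
  | [] => none
  | (tok, i) :: rest =>
    if pvIsContract tok && (pvStrain tok == fs) then
      let si := (d + i) % 4
      if si % 2 == par then some (pvSeats.getD si "")
      else pvFindDecl d fs par rest
    else pvFindDecl d fs par rest

def compute_declarer_py (dealer : String) (bids : List String) : String :=
  let d := pvDealerIndex dealer
  let fin := bids.zipIdx.foldl pvAStep (none, none)
  match fin.1, fin.2 with
  | some fi, some fs =>
    let fsi := (d + fi) % 4
    let par := fsi % 2
    (match pvFindDecl d fs par bids.zipIdx with
     | some s => s
     | none => pvSeats.getD fsi "")
  | _, _ => PySem.Str.upper dealer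

-- ===== PORT B =====
-- B's single pass: dict (parity, strain) -> first index, plus the last contract bid
def pvBStep (st : PySem.Dict (Nat × Char) Nat × Option (Nat × Char)) (p : String × Nat) :
    PySem.Dict (Nat × Char) Nat × Option (Nat × Char) :=
  if pvIsContract p.1 then
    let s := pvStrain p.1
    let k := (p.2 % 2, s)
    let first := if (st.1.get? k).isSome then st.1 else st.1.insert k p.2
    (first, some (p.2, s))
  else st

def compute_declarer_py_alt (dealer : String) (bids : List String) : String :=
  let st := bids.zipIdx.foldl pvBStep (PySem.Dict.empty, none)
  match st.2 with
  | none => PySem.Str.upper dealer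
  | some (li, fs) =>
    let d := pvDealerIndex dealer
    let j := (st.1.get? (li % 2, fs)).getD 0
    pvSeats.getD ((d + j) % 4) ""

-- ===== PRECONDITION & SPEC =====
def Spec_compute_declarer_py (dealer : String) (bids : List String) (out : String) : Prop := out = compute_declarer_py_alt dealer bids
instance (dealer : String) (bids : List String) (out : String) : Decidable (Spec_compute_declarer_py dealer bids out) := by unfold Spec_compute_declarer_py; infer_instance

-- ===== CLAIM (what is proved, stated in full; the proofs are below) =====
def Claim_equal_compute_declarer_py : Prop := ∀ (dealer : String) (bids : List String), Dom_compute_declarer_py dealer bids → Spec_compute_declarer_py dealer bids (compute_declarer_py dealer bids)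

-- ===== LEMMAS AND PROOFS =====

-- B's dict only inserts absent keys, so an existing binding survives the rest of the fold
theorem pvB_mono (l : List (String × Nat))
    (dict : PySem.Dict (Nat × Char) Nat) (o : Option (Nat × Char))
    (k : Nat × Char) (v : Nat) (h : dict.get? k = some v) :
    (l.foldl pvBStep (dict, o)).1.get? k = some v := by
  induction l generalizing dict o with
  | nil => simpa using h
  | cons p rest ih =>
    simp only [List.foldl_cons]
    unfold pvBStep
    split
    · dsimp only
      split
      · exact ih dict _ h
      · rename_i habs
        apply ih
        rw [PySem.Dict.get?_insert_of_ne]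
        · exact h
        · intro hk; subst hk; rw [h] at habs; simp at habs
    · exact ih dict o h

-- invariant: whenever `last` is set, its (parity, strain) key is in the dict
theorem pvB_step_inv (st : PySem.Dict (Nat × Char) Nat × Option (Nat × Char)) (p : String × Nat)
    (hinv : ∀ li fs, st.2 = some (li, fs) → ((st.1.get? (li % 2, fs)).isSome))
    (li : Nat) (fs : Char) (h : (pvBStep st p).2 = some (li, fs)) :
    ((pvBStep st p).1.get? (li % 2, fs)).isSome := by
  by_cases hc : pvIsContract p.1
  · have hs : (pvBStep st p).2 = some (p.2, pvStrain p.1) := by simp [pvBStep, hc]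
    rw [hs] at h
    injection h with h; injection h with h1 h2
    subst h1; subst h2
    by_cases hmem : (st.1.get? (p.2 % 2, pvStrain p.1)).isSome
    · simp [pvBStep, hc, hmem]
    · simp only [Bool.not_eq_true] at hmem
      simp [pvBStep, hc, hmem, PySem.Dict.get?_insert_self]
  · have hs : pvBStep st p = st := by simp [pvBStep, hc]
    rw [hs] at h ⊢
    exact hinv li fs h

theorem pvB_present (l : List (String × Nat))
    (dict : PySem.Dict (Nat × Char) Nat) (o : Option (Nat × Char))
    (hinv : ∀ li fs, o = some (li, fs) → ((dict.get? (li % 2, fs)).isSome))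
    (li : Nat) (fs : Char) (h : (l.foldl pvBStep (dict, o)).2 = some (li, fs)) :
    ((l.foldl pvBStep (dict, o)).1.get? (li % 2, fs)).isSome := by
  induction l generalizing dict o with
  | nil => simp only [List.foldl_nil] at h ⊢; exact hinv li fs h
  | cons p rest ih =>
    simp only [List.foldl_cons] at h ⊢
    refine ih (pvBStep (dict, o) p).1 (pvBStep (dict, o) p).2 ?_ h
    exact fun li' fs' ho => pvB_step_inv (dict, o) p hinv li' fs' ho

-- A's first loop computes exactly the projections of B's `last`
theorem pvAB_last (l : List (String × Nat))
    (dict : PySem.Dict (Nat × Char) Nat) (o : Option (Nat × Char)) :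
    l.foldl pvAStep (o.map Prod.fst, o.map Prod.snd)
      = ((l.foldl pvBStep (dict, o)).2.map Prod.fst,
         (l.foldl pvBStep (dict, o)).2.map Prod.snd) := by
  induction l generalizing dict o with
  | nil => simp
  | cons p rest ih =>
    simp only [List.foldl_cons]
    unfold pvAStep pvBStep
    split
    · exact ih _ (some (p.2, pvStrain p.1))
    · exact ih dict o

-- core: A's second scan equals the lookup of the first-occurrence dict B builds
theorem pvAB_core (l : List (String × Nat))
    (dict : PySem.Dict (Nat × Char) Nat) (o : Option (Nat × Char))
    (d li : Nat) (fs : Char) (h : dict.get? (li % 2, fs) = none) :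
    pvFindDecl d fs ((d + li) % 4 % 2) l
      = ((l.foldl pvBStep (dict, o)).1.get? (li % 2, fs)).map
          (fun j => pvSeats.getD ((d + j) % 4) "") := by
  induction l generalizing dict o with
  | nil => simp [pvFindDecl, h]
  | cons p rest ih =>
    obtain ⟨tok, i⟩ := p
    simp only [List.foldl_cons]
    by_cases hc : pvIsContract tok
    · by_cases hkey : pvStrain tok = fs ∧ i % 2 = li % 2
      · obtain ⟨hs, hp⟩ := hkey
        subst hs
        have h' : dict.get? (i % 2, pvStrain tok) = none := by rw [hp]; exact h
        have hstep : pvBStep (dict, o) (tok, i)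
            = (dict.insert (i % 2, pvStrain tok) i, some (i, pvStrain tok)) := by
          simp [pvBStep, hc, h']
        rw [hstep]
        rw [pvB_mono rest (dict.insert (i % 2, pvStrain tok) i) (some (i, pvStrain tok))
          (li % 2, pvStrain tok) i (by rw [← hp]; exact PySem.Dict.get?_insert_self dict _ i)]
        rw [pvFindDecl]
        have hpar : (d + i) % 2 = (d + li) % 2 := by omega
        simp [hc, hpar]
      · have hne : ((li % 2, fs) : Nat × Char) ≠ (i % 2, pvStrain tok) := by
          intro hk; injection hk with h1 h2; exact hkey ⟨h2.symm, h1.symm⟩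
        rcases hstep : pvBStep (dict, o) (tok, i) with ⟨d2, o2⟩
        have hd2 : d2.get? (li % 2, fs) = none := by
          have h2 : (pvBStep (dict, o) (tok, i)).1.get? (li % 2, fs) = none := by
            by_cases hmem : (dict.get? (i % 2, pvStrain tok)).isSome
            · simp [pvBStep, hc, hmem, h]
            · simp only [Bool.not_eq_true] at hmem
              simp [pvBStep, hc, hmem, PySem.Dict.get?_insert_of_ne _ _ hne, h]
          rwa [hstep] at h2
        have hA : pvFindDecl d fs ((d + li) % 4 % 2) ((tok, i) :: rest)
            = pvFindDecl d fs ((d + li) % 4 % 2) rest := by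
          rw [pvFindDecl]
          by_cases hs : pvStrain tok = fs
          · have hnp : ¬ i % 2 = li % 2 := fun hp => hkey ⟨hs, hp⟩
            have hp2 : ¬ (d + i) % 2 = (d + li) % 2 := by omega
            simp [hc, hs, hp2]
          · simp [hc, hs]
        rw [hA]
        exact ih d2 o2 hd2
    · have hstep : pvBStep (dict, o) (tok, i) = (dict, o) := by simp [pvBStep, hc]
      rw [hstep, pvFindDecl]
      have hb : (pvIsContract tok && (pvStrain tok == fs)) = false := by simp [hc]
      simp only [hb, Bool.false_eq_true, if_false]
      exact ih dict o h

-- ===== VERDICT (by name: the statement is the Claim_ definition above) =====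
theorem compute_declarer_py_spec : Claim_equal_compute_declarer_py := by
  intro dealer bids _
  unfold Spec_compute_declarer_py compute_declarer_py compute_declarer_py_alt
  have hlast := pvAB_last bids.zipIdx PySem.Dict.empty none
  simp only [Option.map_none] at hlast
  rw [hlast]
  cases hfin : (bids.zipIdx.foldl pvBStep (PySem.Dict.empty, none)).2 with
  | none => simp [hfin]
  | some p =>
    obtain ⟨li, fs⟩ := p
    have hsome := pvB_present bids.zipIdx PySem.Dict.empty none (by simp) li fs hfin
    obtain ⟨j, hj⟩ := Option.isSome_iff_exists.mp hsome
    have hcore := pvAB_core bids.zipIdx PySem.Dict.empty none (pvDealerIndex dealer) li fs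
      (PySem.Dict.get?_empty _)
    rw [hj] at hcore
    simp only [Option.map_some] at hcore
    have hmod : (pvDealerIndex dealer + li) % 4 % 2 = (pvDealerIndex dealer + li) % 2 := by omega
    rw [hmod] at hcore
    simp [hfin, hcore, hj, List.getD]
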